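-- pv_equiv track=rewrite | github.com/tonnylei0321/Qoder-LoanFIBO | backend/app/services/rules/dsl_parser.py | _split_by_connector
-- ===== SOURCE A (Python) =====
-- from typing import Any, List, Optional, Union
--
-- def _split_by_connector(formula: str, connector: str) -> List[str]:
--     """引号感知的连接词拆分
--
--     不会拆分引号内包含 AND/OR 的内容，
--     如 name = "AND VALUE" 不会被错误拆分。
--     """
--     pattern = f" {connector} "
--     parts = []
--     current = []
--     in_quote = False
--     quote_char = None
--     i = 0
--     while i < len(formula):
--         # 检查是否进入/退出引号
--         if formula[i] in ('"', "'") and (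
--             not in_quote or formula[i] == quote_char
--         ):
--             if in_quote:
--                 in_quote = False
--                 quote_char = None
--             else:
--                 in_quote = True
--                 quote_char = formula[i]
--             current.append(formula[i])
--             i += 1
--             continue
--         # 只在引号外检查连接词
--         if not in_quote and formula[i:i + len(pattern)] == pattern:
--             parts.append("".join(current))
--             current = []
--             i += len(pattern)
--             continue
--         current.append(formula[i])
--         i += 1
--     if current:
--         parts.append("".join(current))
--     return parts
-- ===== SOURCE B (Python) =====
-- def _split_by_connector(formula, connector):
--     pattern = f" {connector} "
--     n = len(formula)
--     # pass 1: inside[i] = True iff we are inside a quote when about to read formula[i]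
--     inside = [False] * n
--     in_quote = False
--     quote_char = None
--     for i, ch in enumerate(formula):
--         inside[i] = in_quote
--         if ch in ('"', "'") and (not in_quote or ch == quote_char):
--             if in_quote:
--                 in_quote = False
--                 quote_char = None
--             else:
--                 in_quote = True
--                 quote_char = ch
--     # pass 2: record cut positions outside quotes, jumping over each match
--     m = len(pattern)
--     cuts = []
--     i = 0
--     while i < n:
--         if not inside[i] and formula[i:i + m] == pattern:
--             cuts.append(i)
--             i += m
--         else:
--             i += 1
--     # pass 3: slice the original string between cut points
--     parts = []
--     start = 0
--     for c in cuts: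
--         parts.append(formula[start:c])
--         start = c + m
--     last = formula[start:]
--     if last:
--         parts.append(last)
--     return parts
-- ===== Notes on version B (the rewrite author's own statement) =====
-- stated objective: alternative
-- what changed: Replaces A's single fused loop carrying parts/current/quote state by three passes: a quote-state mask over the whole string, a scan recording cut positions against that mask, and slicing the original string between cuts (trailing slice only if non-empty).
-- outside the precondition, e.g. on _split_by_connector('a " b " c', '"'): A returns ['a', 'b', 'c'], B returns ['a', 'b " c']
import Mathlib
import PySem

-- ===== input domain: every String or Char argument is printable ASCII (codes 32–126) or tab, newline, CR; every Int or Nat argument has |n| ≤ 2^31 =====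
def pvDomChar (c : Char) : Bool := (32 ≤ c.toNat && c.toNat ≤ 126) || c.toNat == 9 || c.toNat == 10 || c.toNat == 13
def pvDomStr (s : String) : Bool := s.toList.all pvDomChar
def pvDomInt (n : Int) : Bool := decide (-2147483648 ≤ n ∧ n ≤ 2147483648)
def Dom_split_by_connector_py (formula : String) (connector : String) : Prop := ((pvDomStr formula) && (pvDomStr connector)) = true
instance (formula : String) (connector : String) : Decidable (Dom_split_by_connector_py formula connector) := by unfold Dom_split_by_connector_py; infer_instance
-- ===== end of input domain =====

-- B replaces A's single fused loop by three passes (quote mask, cut-position scan, slicing); return values agree on Pre_.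

-- ===== PORT A =====
-- `formula[i] in ('"', "'")`
def pvIsQuote (c : Char) : Bool := c == '"' || c == '\''

-- A's while-loop; the pattern is passed as head ' ' plus tail so it is never empty
-- (in Python it is " connector ", length ≥ 2).  formula[i:i+m] is (cs.drop i).take m
-- (exact: both indices are non-negative).
def pvALoop (cs : List Char) (p0 : Char) (prest : List Char)
    (i : Nat) (parts : List String) (current : List Char)
    (inq : Bool) (qc : Option Char) : List String :=
  if h : i < cs.length then
    if pvIsQuote cs[i] && (!inq || some cs[i] == qc) then
      if inq then pvALoop cs p0 prest (i+1) parts (current ++ [cs[i]]) false none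
      else pvALoop cs p0 prest (i+1) parts (current ++ [cs[i]]) true (some cs[i])
    else if !inq && ((cs.drop i).take (prest.length+1) == p0 :: prest) then
      pvALoop cs p0 prest (i + (prest.length+1)) (parts ++ [String.mk current]) [] inq qc
    else pvALoop cs p0 prest (i+1) parts (current ++ [cs[i]]) inq qc
  else if current ≠ [] then parts ++ [String.mk current] else parts
termination_by cs.length - i
decreasing_by all_goals omega

def split_by_connector_py (formula : String) (connector : String) : List String :=
  pvALoop formula.toList ' ' (connector.toList ++ [' ']) 0 [] [] false none

-- ===== PORT B =====
-- one step of the quote-state update (same toggle rule as A's, as Source B keeps it)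
def pvStep (st : Bool × Option Char) (c : Char) : Bool × Option Char :=
  if pvIsQuote c && (!st.1 || some c == st.2) then
    if st.1 then (false, none) else (true, some c)
  else st

-- pass 1 of Source B: inside[i] = quote state before reading char i
def pvMask (cs : List Char) (inq : Bool) (qc : Option Char) : List Bool :=
  match cs with
  | [] => []
  | c :: rest => inq :: (let st := pvStep (inq, qc) c; pvMask rest st.1 st.2)

-- pass 2 of Source B: cut positions outside quotes, jumping over each match
def pvScan (cs : List Char) (p0 : Char) (prest : List Char) (mask : List Bool) (i : Nat) : List Nat :=
  if _h : i < cs.length then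
    if !(mask.getD i false) && ((cs.drop i).take (prest.length+1) == p0 :: prest) then
      i :: pvScan cs p0 prest mask (i + (prest.length+1))
    else pvScan cs p0 prest mask (i+1)
  else []
termination_by cs.length - i
decreasing_by all_goals omega

-- pass 3 of Source B: formula[start:c] = (cs.drop start).take (c-start) (exact: indices non-negative)
def pvBuild (cs : List Char) (m : Nat) (cuts : List Nat) (start : Nat) : List String :=
  match cuts with
  | [] => if cs.drop start ≠ [] then [String.mk (cs.drop start)] else []
  | c :: rest => String.mk ((cs.drop start).take (c - start)) :: pvBuild cs m rest (c + m)

def split_by_connector_py_alt (formula : String) (connector : String) : List String :=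
  let cs := formula.toList
  let mask := pvMask cs false none
  let cuts := pvScan cs ' ' (connector.toList ++ [' ']) mask 0
  pvBuild cs (connector.toList.length + 2) cuts 0

-- ===== PRECONDITION & SPEC =====
-- Pre_ excludes the pathological corner where the connector contains a quote character and
-- the padded pattern " connector " occurs in the formula: there A's fused loop skips the quote
-- inside a matched connector while B's precomputed mask processes it, and on this unspecified
-- corner both resulting values are equally defensible.
def Pre_split_by_connector_py (formula : String) (connector : String) : Prop :=
  ('"' ∈ connector.toList ∨ '\'' ∈ connector.toList) →
    ¬ (' ' :: (connector.toList ++ [' '])) <:+: formula.toList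
instance (formula : String) (connector : String) : Decidable (Pre_split_by_connector_py formula connector) := by unfold Pre_split_by_connector_py; infer_instance

def pvWitness_split_by_connector_py : String × String := ("a = \"x AND y\" AND b = 'z'", "AND")

def Spec_split_by_connector_py (formula : String) (connector : String) (out : List String) : Prop := out = split_by_connector_py_alt formula connector
instance (formula : String) (connector : String) (out : List String) : Decidable (Spec_split_by_connector_py formula connector out) := by unfold Spec_split_by_connector_py; infer_instance

-- ===== CLAIM (what is proved, stated in full; the proofs are below) =====
def Claim_equal_split_by_connector_py : Prop := ∀ (formula : String) (connector : String), Dom_split_by_connector_py formula connector → Pre_split_by_connector_py formula connector → Spec_split_by_connector_py formula connector (split_by_connector_py formula connector)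

-- ===== LEMMAS AND PROOFS =====

-- mask entry i is the quote flag obtained by folding pvStep over the first i chars
theorem pvMask_getD (cs : List Char) (inq : Bool) (qc : Option Char) (i : Nat)
    (h : i < cs.length) :
    (pvMask cs inq qc).getD i false = ((cs.take i).foldl pvStep (inq, qc)).1 := by
  induction cs generalizing i inq qc with
  | nil => simp at h
  | cons c rest ih =>
    cases i with
    | zero => simp [pvMask]
    | succ j =>
      simp only [pvMask, List.getD_cons_succ, List.take_succ_cons, List.foldl_cons]
      exact ih _ _ j (by simpa using h)

-- folding pvStep over quote-free chars from (false, none) stays at (false, none)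
theorem pvStep_fold_noquote (l : List Char) (hq : ∀ c ∈ l, pvIsQuote c = false) :
    l.foldl pvStep (false, none) = (false, none) := by
  induction l with
  | nil => rfl
  | cons c rest ih =>
    have hc : pvIsQuote c = false := hq c (by simp)
    have hstep : pvStep (false, none) c = (false, none) := by simp [pvStep, hc]
    rw [List.foldl_cons, hstep]
    exact ih (fun d hd => hq d (by simp [hd]))

-- one fold step: processing one more char applies pvStep at that char
theorem pvFold_take_succ (cs : List Char) (s : Bool × Option Char) (i : Nat)
    (h : i < cs.length) :
    (cs.take (i+1)).foldl pvStep s = pvStep ((cs.take i).foldl pvStep s) cs[i] := by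
  rw [List.take_add_one, List.getElem?_eq_getElem h, List.foldl_append]
  rfl

-- extending the current segment by one char
theorem pvSeg_snoc (cs : List Char) (start i : Nat) (hsi : start ≤ i) (h : i < cs.length) :
    (cs.drop start).take (i - start) ++ [cs[i]] = (cs.drop start).take (i + 1 - start) := by
  have h1 : i + 1 - start = (i - start) + 1 := by omega
  have h2 : (cs.drop start)[i - start]? = some cs[i] := by
    rw [List.getElem?_drop]
    rw [List.getElem?_eq_getElem (by omega)]
    congr 1
    congr 1
    omega
  rw [h1, List.take_add_one, h2]
  rfl

-- a quote char cannot start the pattern (the pattern begins with a non-quote char)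
theorem pvQuote_no_match (cs : List Char) (p0 : Char) (prest : List Char) (i : Nat)
    (h : i < cs.length) (hp0 : pvIsQuote p0 = false) (hcq : pvIsQuote cs[i] = true) :
    ((cs.drop i).take (prest.length+1) == p0 :: prest) = false := by
  rw [List.drop_eq_getElem_cons h]
  simp only [List.take_succ_cons]
  apply beq_eq_false_iff_ne.mpr
  intro he
  have : cs[i] = p0 := by injection he
  rw [this, hp0] at hcq
  exact Bool.false_ne_true hcq

-- the main loop invariant: A's fused loop equals parts ++ (B's build over B's scan)
theorem pvLoop_eq (cs : List Char) (p0 : Char) (prest : List Char)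
    (hq : ∀ c ∈ p0 :: prest, pvIsQuote c = false) :
    ∀ i : Nat, ∀ (inq : Bool) (qc : Option Char) (parts : List String) (start : Nat),
      start ≤ i →
      (cs.take i).foldl pvStep (false, none) = (inq, qc) →
      (inq = false → qc = none) →
      pvALoop cs p0 prest i parts ((cs.drop start).take (i - start)) inq qc
        = parts ++ pvBuild cs (prest.length+1) (pvScan cs p0 prest (pvMask cs false none) i) start := by
  have hp0 : pvIsQuote p0 = false := hq p0 (by simp)
  have main : ∀ k : Nat, ∀ i : Nat, cs.length - i ≤ k →
      ∀ (inq : Bool) (qc : Option Char) (parts : List String) (start : Nat),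
      start ≤ i →
      (cs.take i).foldl pvStep (false, none) = (inq, qc) →
      (inq = false → qc = none) →
      pvALoop cs p0 prest i parts ((cs.drop start).take (i - start)) inq qc
        = parts ++ pvBuild cs (prest.length+1) (pvScan cs p0 prest (pvMask cs false none) i) start := by
    intro k
    induction k with
    | zero =>
      intro i hk inq qc parts start hsi hst hqc
      have hn : ¬ i < cs.length := by omega
      rw [pvALoop, dif_neg hn, pvScan, dif_neg hn]
      have hdl : (cs.drop start).length ≤ i - start := by
        simp only [List.length_drop]; omega
      rw [List.take_of_length_le hdl]
      simp only [pvBuild]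
      split_ifs with hcur
      · simp
      · simp [hcur]
    | succ k ih =>
      intro i hk inq qc parts start hsi hst hqc
      by_cases h : i < cs.length
      · have hmask : (pvMask cs false none).getD i false = inq := by
          rw [pvMask_getD cs false none i h, hst]
        rw [pvALoop, dif_pos h, pvScan, dif_pos h]
        by_cases hquote : (pvIsQuote cs[i] && (!inq || some cs[i] == qc)) = true
        · -- quote toggle: no split here, state changes by pvStep
          rw [if_pos hquote]
          have hcq : pvIsQuote cs[i] = true := by
            have := hquote
            simp only [Bool.and_eq_true] at this
            exact this.1
          have hnm := pvQuote_no_match cs p0 prest i h hp0 hcq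
          have hscan : (if (!(pvMask cs false none).getD i false && ((cs.drop i).take (prest.length+1) == p0 :: prest)) = true
              then i :: pvScan cs p0 prest (pvMask cs false none) (i + (prest.length+1))
              else pvScan cs p0 prest (pvMask cs false none) (i+1))
              = pvScan cs p0 prest (pvMask cs false none) (i+1) := by
            rw [hnm, Bool.and_false]
            simp
          rw [hscan]
          have hstep : pvStep (inq, qc) cs[i] = if inq then (false, none) else (true, some cs[i]) := by
            simp only [pvStep]
            rw [if_pos (by simpa using hquote)]
          have hst' : (cs.take (i+1)).foldl pvStep (false, none) = pvStep (inq, qc) cs[i] := by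
            rw [pvFold_take_succ cs _ i h, hst]
          cases inq with
          | false =>
            rw [if_neg (by simp), pvSeg_snoc cs start i hsi h]
            exact ih (i+1) (by omega) true (some cs[i]) parts start (by omega)
              (by rw [hst', hstep]; simp) (fun hx => by cases hx)
          | true =>
            rw [if_pos rfl, pvSeg_snoc cs start i hsi h]
            exact ih (i+1) (by omega) false none parts start (by omega)
              (by rw [hst', hstep]; simp) (fun _ => rfl)
        · rw [if_neg hquote]
          have hquote' : (pvIsQuote cs[i] && (!inq || some cs[i] == qc)) = false :=
            Bool.not_eq_true _ ▸ (by simpa using hquote)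
          have hst' : (cs.take (i+1)).foldl pvStep (false, none) = (inq, qc) := by
            rw [pvFold_take_succ cs _ i h, hst]
            simp only [pvStep]
            rw [if_neg (by simp [hquote'])]
          by_cases hpat : (!inq && ((cs.drop i).take (prest.length+1) == p0 :: prest)) = true
          · -- split point: both sides cut here and jump by the pattern length
            rw [if_pos hpat, if_pos (by rw [hmask]; exact hpat)]
            have hpat' := hpat
            simp only [Bool.and_eq_true] at hpat'
            have hinq : inq = false := by simpa using hpat'.1
            have hmatch : (cs.drop i).take (prest.length+1) = p0 :: prest :=
              beq_iff_eq.mp hpat'.2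
            have hstj : (cs.take (i + (prest.length+1))).foldl pvStep (false, none) = (false, none) := by
              rw [List.take_add, List.foldl_append, hst, hinq, hqc hinq, hmatch]
              exact pvStep_fold_noquote (p0 :: prest) hq
            have := ih (i + (prest.length+1)) (by omega) false none
              (parts ++ [String.mk ((cs.drop start).take (i - start))]) (i + (prest.length+1))
              le_rfl hstj (fun _ => rfl)
            simp only [Nat.sub_self, List.take_zero] at this
            rw [hinq, hqc hinq, this, pvBuild]
            simp
          · rw [if_neg hpat, if_neg (by rw [hmask]; exact hpat), pvSeg_snoc cs start i hsi h]
            exact ih (i+1) (by omega) inq qc parts start (by omega) hst' hqc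
      · have hn := h
        rw [pvALoop, dif_neg hn, pvScan, dif_neg hn]
        have hdl : (cs.drop start).length ≤ i - start := by
          simp only [List.length_drop]; omega
        rw [List.take_of_length_le hdl]
        simp only [pvBuild]
        split_ifs with hcur
        · simp
        · simp [hcur]
  intro i
  exact main (cs.length - i) i (le_refl _)

-- a match at any position makes the pattern an infix of the formula
theorem pvNoMatch_of_not_infix (cs : List Char) (p0 : Char) (prest : List Char) (i : Nat)
    (hni : ¬ (p0 :: prest) <:+: cs) :
    ((cs.drop i).take (prest.length+1) == p0 :: prest) = false := by
  apply beq_eq_false_iff_ne.mpr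
  intro he
  exact hni (he ▸ ((List.take_prefix _ _).isInfix.trans (List.drop_suffix _ _).isInfix))

-- if the pattern never occurs, A's loop just collects the remaining characters
theorem pvALoop_no_match (cs : List Char) (p0 : Char) (prest : List Char)
    (hni : ¬ (p0 :: prest) <:+: cs) :
    ∀ (i : Nat) (parts : List String) (current : List Char) (inq : Bool) (qc : Option Char),
    pvALoop cs p0 prest i parts current inq qc
      = if current ++ cs.drop i ≠ [] then parts ++ [String.mk (current ++ cs.drop i)] else parts := by
  have main : ∀ k i, cs.length - i ≤ k →
      ∀ (parts : List String) (current : List Char) (inq : Bool) (qc : Option Char),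
      pvALoop cs p0 prest i parts current inq qc
        = if current ++ cs.drop i ≠ [] then parts ++ [String.mk (current ++ cs.drop i)] else parts := by
    intro k
    induction k with
    | zero =>
      intro i hk parts current inq qc
      have hn : ¬ i < cs.length := by omega
      rw [pvALoop, dif_neg hn, List.drop_of_length_le (by omega)]
      simp
    | succ k ih =>
      intro i hk parts current inq qc
      by_cases h : i < cs.length
      · have hd : current ++ cs.drop i = (current ++ [cs[i]]) ++ cs.drop (i+1) := by
          rw [List.drop_eq_getElem_cons h]
          simp
        rw [pvALoop, dif_pos h]
        by_cases hqt : (pvIsQuote cs[i] && (!inq || some cs[i] == qc)) = true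
        · rw [if_pos hqt]
          cases inq with
          | false => rw [if_neg (by simp), ih (i+1) (by omega), hd]
          | true => rw [if_pos rfl, ih (i+1) (by omega), hd]
        · rw [if_neg hqt, pvNoMatch_of_not_infix cs p0 prest i hni, Bool.and_false,
              if_neg (by simp), ih (i+1) (by omega), hd]
      · have hn := h
        rw [pvALoop, dif_neg hn, List.drop_of_length_le (by omega)]
        simp
  intro i
  exact main (cs.length - i) i (le_refl _)

-- if the pattern never occurs, B's scan records no cut
theorem pvScan_no_match (cs : List Char) (p0 : Char) (prest : List Char)
    (hni : ¬ (p0 :: prest) <:+: cs) (mask : List Bool) :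
    ∀ i : Nat, pvScan cs p0 prest mask i = [] := by
  have main : ∀ k i, cs.length - i ≤ k → pvScan cs p0 prest mask i = [] := by
    intro k
    induction k with
    | zero =>
      intro i hk
      rw [pvScan, dif_neg (by omega)]
    | succ k ih =>
      intro i hk
      by_cases h : i < cs.length
      · rw [pvScan, dif_pos h, pvNoMatch_of_not_infix cs p0 prest i hni, Bool.and_false,
            if_neg (by simp)]
        exact ih (i+1) (by omega)
      · rw [pvScan, dif_neg h]
  intro i
  exact main (cs.length - i) i (le_refl _)

-- ===== VERDICT (by name: the statement is the Claim_ definition above) =====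
theorem split_by_connector_py_spec : Claim_equal_split_by_connector_py := by
  unfold Claim_equal_split_by_connector_py
  intro formula connector _ hpre
  unfold Spec_split_by_connector_py split_by_connector_py split_by_connector_py_alt
  by_cases hqs : ('"' ∈ connector.toList ∨ '\'' ∈ connector.toList)
  · -- a quote inside the connector: Pre_ says the pattern never occurs, so both
    -- sides return the whole formula (as a single part, or nothing if empty)
    have hni : ¬ (' ' :: (connector.toList ++ [' '])) <:+: formula.toList := by
      unfold Pre_split_by_connector_py at hpre
      exact hpre hqs
    have hA := pvALoop_no_match formula.toList ' ' (connector.toList ++ [' ']) hni 0 [] [] false none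
    have hS := pvScan_no_match formula.toList ' ' (connector.toList ++ [' ']) hni
      (pvMask formula.toList false none) 0
    simp only [hA, hS, pvBuild]
    simp
  · push_neg at hqs
    have hq : ∀ c ∈ ' ' :: (connector.toList ++ [' ']), pvIsQuote c = false := by
      intro c hc
      simp only [List.mem_cons, List.mem_append] at hc
      rcases hc with h1 | h2 | h3
      · subst h1; decide
      · have h4 : c ≠ '"' := fun he => hqs.1 (he ▸ h2)
        have h5 : c ≠ '\'' := fun he => hqs.2 (he ▸ h2)
        simp [pvIsQuote, h4, h5]
      · rcases h3 with rfl | h4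
        · decide
        · simp at h4
    have := pvLoop_eq formula.toList ' ' (connector.toList ++ [' ']) hq 0 false none [] 0
      (le_refl 0) rfl (fun _ => rfl)
    simpa using this
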